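-- pv_equiv track=rewrite | github.com/willasbery/year-in-pixels | backend/app/utils.py | normalize_hex_color
-- ===== SOURCE A (Python) =====
-- from typing import Any
--
-- def normalize_hex_color(value: Any, fallback: str | None) -> str | None:
--     if not isinstance(value, str):
--         return fallback
--
--     trimmed = value.strip()
--     if len(trimmed) == 7 and trimmed.startswith("#"):
--         candidate = trimmed[1:]
--     elif len(trimmed) == 6:
--         candidate = trimmed
--     else:
--         return fallback
--
--     if any(ch not in "0123456789abcdefABCDEF" for ch in candidate):
--         return fallback
--
--     return f"#{candidate.lower()}"
-- ===== SOURCE B (Python) =====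
-- _HEX_DIGITS = "0123456789abcdef"
-- _HEX_VALUES = {
--     "0": 0, "1": 1, "2": 2, "3": 3, "4": 4, "5": 5, "6": 6, "7": 7,
--     "8": 8, "9": 9, "a": 10, "b": 11, "c": 12, "d": 13, "e": 14, "f": 15,
--     "A": 10, "B": 11, "C": 12, "D": 13, "E": 14, "F": 15,
-- }
--
-- def normalize_hex_color(value, fallback):
--     if not isinstance(value, str):
--         return fallback
--     t = value.strip()
--     body = t[1:] if t.startswith("#") else t
--     if len(body) != 6:
--         return fallback
--     # parse the six digits into a number; any non-hex char aborts
--     n = 0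
--     for ch in body:
--         d = _HEX_VALUES.get(ch)
--         if d is None:
--             return fallback
--         n = n * 16 + d
--     # re-format the number as six lowercase hex digits
--     digits = []
--     for _ in range(6):
--         n, r = divmod(n, 16)
--         digits.append(_HEX_DIGITS[r])
--     return "#" + "".join(reversed(digits))
-- ===== Notes on version B (the rewrite author's own statement) =====
-- stated objective: alternative
-- what changed: B parses the six digits through a digit-value dictionary into an integer and re-formats that integer as six lowercase hex digits (divmod loop), instead of A's per-character membership test on the hex alphabet followed by str.lower on the original characters.
import Mathlib
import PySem

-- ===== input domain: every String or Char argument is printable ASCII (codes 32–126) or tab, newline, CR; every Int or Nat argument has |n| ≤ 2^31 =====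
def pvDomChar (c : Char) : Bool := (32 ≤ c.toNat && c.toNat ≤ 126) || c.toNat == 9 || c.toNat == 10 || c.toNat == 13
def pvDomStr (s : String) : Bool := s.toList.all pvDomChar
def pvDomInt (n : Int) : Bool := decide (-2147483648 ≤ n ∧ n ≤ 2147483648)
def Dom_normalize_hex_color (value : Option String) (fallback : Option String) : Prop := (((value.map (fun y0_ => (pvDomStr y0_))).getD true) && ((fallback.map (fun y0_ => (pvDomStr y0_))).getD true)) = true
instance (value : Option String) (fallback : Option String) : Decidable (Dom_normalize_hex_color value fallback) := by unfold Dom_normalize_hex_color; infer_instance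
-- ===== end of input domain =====

-- ===== PORT A =====

-- B parses the six digits into an integer via a digit-value dictionary and re-formats it
-- as six lowercase hex digits, instead of A's membership scan + lower (alternative).

-- the character class "0123456789abcdefABCDEF" (A's literal)
def pvHexChars : List Char := "0123456789abcdefABCDEF".toList

-- ===== PORT A =====
-- 'ch not in "0123456789abcdefABCDEF"' for a single character is membership in that string.
def normalize_hex_color (value : Option String) (fallback : Option String) : Option String :=
  match value with
  | none => fallback                      -- not isinstance(value, str)
  | some s =>
    let trimmed := PySem.Chars.strip s.toList
    let cand? : Option (List Char) :=
      if trimmed.length = 7 ∧ PySem.Chars.startswith trimmed ['#'] then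
        some (PySem.Chars.slice trimmed (some 1) none)          -- trimmed[1:]
      else if trimmed.length = 6 then some trimmed
      else none
    match cand? with
    | none => fallback
    | some candidate =>
      if candidate.any (fun ch => !(pvHexChars.contains ch)) then fallback
      else some (String.ofList ('#' :: PySem.Chars.lower candidate))   -- f"#{candidate.lower()}"

-- ===== PORT B =====
def pvHexDigits : List Char := "0123456789abcdef".toList        -- _HEX_DIGITS

def pvHexValues : PySem.Dict Char Nat :=                         -- _HEX_VALUES (literal dict)
  PySem.Dict.mk [('0',0),('1',1),('2',2),('3',3),('4',4),('5',5),('6',6),('7',7),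
                 ('8',8),('9',9),('a',10),('b',11),('c',12),('d',13),('e',14),('f',15),
                 ('A',10),('B',11),('C',12),('D',13),('E',14),('F',15)]

-- the parse loop: n accumulates; a missing digit value aborts (the early 'return fallback')
def pvParseHex : List Char → Nat → Option Nat
  | [], n => some n
  | c :: cs, n =>
    match pvHexValues.get? c with
    | none => none
    | some d => pvParseHex cs (n * 16 + d)

-- the format loop over range(6): divmod and append, then reversed/join
def pvFmtLoop : Nat → Nat → List Char → Nat × List Char
  | 0, n, ds => (n, ds)
  | k + 1, n, ds => pvFmtLoop k (n / 16) (ds ++ [pvHexDigits.getD (n % 16) ' '])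

def normalize_hex_color_alt (value : Option String) (fallback : Option String) : Option String :=
  match value with
  | none => fallback                      -- not isinstance(value, str)
  | some s =>
    let t := PySem.Chars.strip s.toList
    let body := if PySem.Chars.startswith t ['#'] then PySem.Chars.slice t (some 1) none else t
    if body.length ≠ 6 then fallback
    else
      match pvParseHex body 0 with
      | none => fallback
      | some n =>
        let digits := (pvFmtLoop 6 n []).2
        some (String.ofList ('#' :: digits.reverse))             -- "#" + "".join(reversed(digits))

-- ===== PRECONDITION & SPEC =====
def Spec_normalize_hex_color (value : Option String) (fallback : Option String) (out : Option String) : Prop := out = normalize_hex_color_alt value fallback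
instance (value : Option String) (fallback : Option String) (out : Option String) : Decidable (Spec_normalize_hex_color value fallback out) := by unfold Spec_normalize_hex_color; infer_instance

-- ===== CLAIM =====
def Claim_equal_normalize_hex_color : Prop := ∀ (value : Option String) (fallback : Option String), Dom_normalize_hex_color value fallback → Spec_normalize_hex_color value fallback (normalize_hex_color value fallback)

-- ===== LEMMAS AND PROOFS =====

theorem pv_hexchars_lit : pvHexChars = ['0','1','2','3','4','5','6','7','8','9','a','b','c','d','e','f','A','B','C','D','E','F'] := by decide

-- the dictionary has a value exactly for the characters of A's hex alphabet
theorem pv_hexval_isSome (c : Char) :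
    (pvHexValues.get? c).isSome = pvHexChars.contains c := by
  cases hg : pvHexValues.get? c with
  | some d =>
    have hm := PySem.Dict.mem_items_of_get?_eq_some _ hg
    have hc : c ∈ pvHexChars := by
      rw [pv_hexchars_lit]
      simp only [pvHexValues] at hm
      simpa using List.mem_map_of_mem hm (f := Prod.fst)
    simp [hc]
  | none =>
    cases hcc : pvHexChars.contains c with
    | false => rfl
    | true =>
      have hmem : c ∈ pvHexChars := by simpa using hcc
      rw [pv_hexchars_lit] at hmem
      fin_cases hmem <;> exact absurd hg (by decide)

-- a stored digit value is < 16 and formats back to the lowercased character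
theorem pv_hexval_some (c : Char) (d : Nat) (h : pvHexValues.get? c = some d) :
    d < 16 ∧ pvHexDigits.getD d ' ' = PySem.Chars.lowerChar c := by
  have hm := PySem.Dict.mem_items_of_get?_eq_some _ h
  simp only [pvHexValues, List.mem_cons, Prod.mk.injEq, List.not_mem_nil, or_false] at hm
  rcases hm with ⟨rfl,rfl⟩|⟨rfl,rfl⟩|⟨rfl,rfl⟩|⟨rfl,rfl⟩|⟨rfl,rfl⟩|⟨rfl,rfl⟩|⟨rfl,rfl⟩|⟨rfl,rfl⟩|⟨rfl,rfl⟩|⟨rfl,rfl⟩|⟨rfl,rfl⟩|⟨rfl,rfl⟩|⟨rfl,rfl⟩|⟨rfl,rfl⟩|⟨rfl,rfl⟩|⟨rfl,rfl⟩|⟨rfl,rfl⟩|⟨rfl,rfl⟩|⟨rfl,rfl⟩|⟨rfl,rfl⟩|⟨rfl,rfl⟩|⟨rfl,rfl⟩ <;> exact ⟨by decide, by decide⟩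

-- parse over an appended list
theorem pv_parse_append (xs ys : List Char) (n : Nat) :
    pvParseHex (xs ++ ys) n = (pvParseHex xs n).bind (fun m => pvParseHex ys m) := by
  induction xs generalizing n with
  | nil => rfl
  | cons c cs ih =>
    simp only [List.cons_append, pvParseHex]
    cases pvHexValues.get? c with
    | none => rfl
    | some d => exact ih _

-- parse succeeds exactly on all-hex lists
theorem pv_parse_isSome (ds : List Char) (n : Nat) :
    (pvParseHex ds n).isSome = ds.all (fun c => pvHexChars.contains c) := by
  induction ds generalizing n with
  | nil => rfl
  | cons c cs ih =>
    simp only [pvParseHex, List.all_cons]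
    have hc := pv_hexval_isSome c
    cases h : pvHexValues.get? c with
    | none => rw [← hc, h]; rfl
    | some d => rw [← hc, h]; exact ih _

-- formatting a parsed value reproduces the lowercased digits (in reverse append order)
theorem pv_fmt_parse (ds : List Char) (v : Nat) (pre : List Char)
    (h : pvParseHex ds 0 = some v) :
    (pvFmtLoop ds.length v pre).2 = pre ++ (ds.map PySem.Chars.lowerChar).reverse := by
  induction ds using List.reverseRecOn generalizing v pre with
  | nil => cases h; simp [pvFmtLoop]
  | append_singleton ds' c ih =>
    rw [pv_parse_append] at h
    cases hp : pvParseHex ds' 0 with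
    | none => rw [hp] at h; cases h
    | some p =>
      rw [hp] at h
      simp only [Option.bind_some, pvParseHex] at h
      cases hd : pvHexValues.get? c with
      | none => rw [hd] at h; cases h
      | some d =>
        rw [hd] at h
        cases h
        obtain ⟨hd16, hdig⟩ := pv_hexval_some c d hd
        have hdiv : (p * 16 + d) / 16 = p := by omega
        have hmod : (p * 16 + d) % 16 = d := by omega
        simp only [List.length_append, List.length_cons, List.length_nil, pvFmtLoop,
          hdiv, hmod, hdig]
        rw [ih p _ hp]
        simp

-- the core equivalence on the trimmed character list
theorem pv_core_eq (t : List Char) (fallback : Option String) :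
    (let cand? : Option (List Char) :=
      if t.length = 7 ∧ PySem.Chars.startswith t ['#'] then
        some (PySem.Chars.slice t (some 1) none)
      else if t.length = 6 then some t
      else none
     match cand? with
     | none => fallback
     | some candidate =>
       if candidate.any (fun ch => !(pvHexChars.contains ch)) then fallback
       else some (String.ofList ('#' :: PySem.Chars.lower candidate))) =
    (let body := if PySem.Chars.startswith t ['#'] then PySem.Chars.slice t (some 1) none else t
     if body.length ≠ 6 then fallback
     else
       match pvParseHex body 0 with
       | none => fallback
       | some n =>
         some (String.ofList ('#' :: ((pvFmtLoop 6 n []).2).reverse))) := by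
  have key : ∀ (body : List Char), body.length = 6 →
      (if body.any (fun ch => !(pvHexChars.contains ch)) then fallback
       else some (String.ofList ('#' :: PySem.Chars.lower body))) =
      (match pvParseHex body 0 with
       | none => fallback
       | some n => some (String.ofList ('#' :: ((pvFmtLoop 6 n []).2).reverse))) := by
    intro body h6
    have hs := pv_parse_isSome body 0
    cases hp : pvParseHex body 0 with
    | none =>
      rw [hp] at hs
      have : body.any (fun ch => !(pvHexChars.contains ch)) = true := by
        rw [List.any_eq_not_all_not]
        simp only [Bool.not_not]
        rw [← hs]; rfl
      rw [this]
      rfl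
    | some v =>
      rw [hp] at hs
      have hall : body.all (fun c => pvHexChars.contains c) = true := by rw [← hs]; rfl
      have hany : body.any (fun ch => !(pvHexChars.contains ch)) = false := by
        rw [List.any_eq_not_all_not]
        simp only [Bool.not_not]
        rw [hall]; rfl
      rw [hany]
      have hfmt := pv_fmt_parse body v [] hp
      rw [h6] at hfmt
      simp only [Bool.false_eq_true, if_false, hfmt, List.nil_append, List.reverse_reverse]
      have : PySem.Chars.lower body = body.map PySem.Chars.lowerChar := by
        simp [PySem.Chars.lower]
      rw [this]
  simp only [PySem.Chars.slice_eq_listSlice, PySem.List.slice_from_one]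
  by_cases hsw : PySem.Chars.startswith t ['#']
  · obtain ⟨rest, rfl⟩ : ∃ rest, t = '#' :: rest := by
      rw [PySem.Chars.startswith_iff] at hsw
      obtain ⟨r, hr⟩ := hsw
      exact ⟨r, hr.symm⟩
    simp only [hsw, if_true, List.tail_cons, List.length_cons]
    by_cases h7 : rest.length + 1 = 7
    · have h6 : rest.length = 6 := by omega
      simp only [and_self, if_true, h6, ne_eq, not_true_eq_false,
        if_false]
      exact key rest h6
    · have hne : rest.length ≠ 6 := by omega
      simp only [h7, false_and, if_false, ne_eq, hne, not_false_eq_true, if_true]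
      by_cases h6 : rest.length + 1 = 6
      · have hhash : (('#' :: rest).any fun ch => !(pvHexChars.contains ch)) = true := by
          rw [List.any_cons]
          rw [show (!pvHexChars.contains '#') = true from by decide, Bool.true_or]
        rw [if_pos h6]
        dsimp only
        rw [hhash]
        rfl
      · rw [if_neg h6]
  · have hcond : ¬ (t.length = 7 ∧ PySem.Chars.startswith t ['#'] = true) := fun h => hsw h.2
    rw [if_neg hcond, if_neg hsw]
    by_cases h6 : t.length = 6
    · rw [if_pos h6]
      simp only [ne_eq, h6, not_true_eq_false, if_false]
      exact key t h6
    · simp [h6]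

-- ===== VERDICT =====
theorem normalize_hex_color_spec : Claim_equal_normalize_hex_color := by
  intro value fallback _
  unfold Spec_normalize_hex_color normalize_hex_color normalize_hex_color_alt
  cases value with
  | none => rfl
  | some s => exact pv_core_eq (PySem.Chars.strip s.toList) fallback
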